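-- pv_equiv track=rewrite | github.com/MrBrantCode/unitest_baseline | mut_generate/mist_train_taco/taco_14589/solution.py | min_insertions_to_avoid_three_consecutive
-- ===== SOURCE A (Python) =====
-- def min_insertions_to_avoid_three_consecutive(s: str) -> int:
--     i = 2
--     res = 0
--     while i < len(s):
--         if s[i] == s[i - 1] == s[i - 2]:
--             res += 1
--             i += 2
--         else:
--             i += 1
--     return res
-- ===== SOURCE B (Python) =====
-- def min_insertions_to_avoid_three_consecutive(s: str) -> int:
--     total = 0
--     i = 0
--     n = len(s)
--     while i < n:
--         j = i + 1
--         while j < n and s[j] == s[i]: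
--             j += 1
--         # run s[i:j] has length j - i; it needs (len - 1) // 2 insertions
--         total += (j - i - 1) // 2
--         i = j
--     return total
-- ===== Notes on version B (the rewrite author's own statement) =====
-- stated objective: alternative
-- what changed: B scans each maximal run of equal characters once and adds the closed form (L-1)//2 per run, replacing A's sliding-window greedy that compares s[i],s[i-1],s[i-2] and skips ahead by 2 on a hit.
import Mathlib
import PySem

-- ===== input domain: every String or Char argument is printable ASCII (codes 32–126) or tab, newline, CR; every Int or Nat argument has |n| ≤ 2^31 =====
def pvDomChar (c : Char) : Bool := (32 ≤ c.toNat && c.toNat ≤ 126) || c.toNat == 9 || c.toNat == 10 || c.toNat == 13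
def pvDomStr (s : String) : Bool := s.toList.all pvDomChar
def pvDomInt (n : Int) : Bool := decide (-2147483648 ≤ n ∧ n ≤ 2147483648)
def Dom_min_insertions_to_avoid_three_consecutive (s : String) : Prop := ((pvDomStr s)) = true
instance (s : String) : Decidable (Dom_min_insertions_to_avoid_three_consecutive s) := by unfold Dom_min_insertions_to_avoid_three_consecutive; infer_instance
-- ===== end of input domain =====

-- B replaces A's sliding-window greedy (compare s[i],s[i-1],s[i-2], skip 2 on a hit) by a
-- run-length scan adding the closed form (L-1)//2 per maximal run; alternative decomposition, same O(n) cost.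

-- ===== PORT A =====
-- the while loop of A: index i, accumulator res; s[i-1], s[i-2] are always in range when read
def loopA (cs : List Char) (i : Nat) (res : Int) : Int :=
  if _h : i < cs.length then
    if cs.getD i ' ' = cs.getD (i - 1) ' ' ∧ cs.getD i ' ' = cs.getD (i - 2) ' ' then
      loopA cs (i + 2) (res + 1)
    else
      loopA cs (i + 1) res
  else res
termination_by cs.length - i

def min_insertions_to_avoid_three_consecutive (s : String) : Int := loopA s.toList 2 0

-- ===== PORT B =====
-- Source B's outer while loop: each iteration consumes one maximal run c :: (extra equal chars)
-- and adds (run length - 1) // 2 = (extra chars) / 2; the inner while is the takeWhile/dropWhile scan.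
def altL : List Char → Int
  | [] => 0
  | c :: l =>
    (((l.takeWhile (· == c)).length / 2 : Nat) : Int) + altL (l.dropWhile (· == c))
termination_by l => l.length
decreasing_by
  have := List.length_dropWhile_le (· == c) l
  simp; omega

def min_insertions_to_avoid_three_consecutive_alt (s : String) : Int := altL s.toList

-- ===== PRECONDITION & SPEC =====
def Spec_min_insertions_to_avoid_three_consecutive (s : String) (out : Int) : Prop := out = min_insertions_to_avoid_three_consecutive_alt s
instance (s : String) (out : Int) : Decidable (Spec_min_insertions_to_avoid_three_consecutive s out) := by unfold Spec_min_insertions_to_avoid_three_consecutive; infer_instance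

-- ===== CLAIM (what is proved, stated in full; the proofs are below) =====
def Claim_equal_min_insertions_to_avoid_three_consecutive : Prop := ∀ (s : String), Dom_min_insertions_to_avoid_three_consecutive s → Spec_min_insertions_to_avoid_three_consecutive s (min_insertions_to_avoid_three_consecutive s)

-- ===== LEMMAS AND PROOFS =====

-- A's loop, rephrased structurally: state = the two previous characters, then the rest of the string.
def cntA : Char → Char → List Char → Int
  | _, _, [] => 0
  | a, b, [c] => if c = b ∧ c = a then 1 else 0
  | a, b, c :: d :: l' => if c = b ∧ c = a then 1 + cntA c d l' else cntA b c (d :: l')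

theorem cntA_cons_neg (a b c : Char) (l : List Char) (h : ¬ (c = b ∧ c = a)) :
    cntA a b (c :: l) = cntA b c l := by
  cases l <;> simp [cntA, h]

theorem cnt_eq_altL (l : List Char) (a b : Char) : cntA a b l = altL (a :: b :: l) := by
  match l with
  | [] =>
    by_cases hba : b = a
    · subst hba; simp [cntA, altL]
    · simp [cntA, altL, hba]
  | [c] =>
    by_cases h : c = b ∧ c = a
    · obtain ⟨h1, h2⟩ := h
      rw [← h1, ← h2]
      simp [cntA, altL]
    · rw [show cntA a b [c] = 0 from by simp only [cntA]; rw [if_neg h]]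
      by_cases hba : b = a
      · have hcb : ¬ c = b := fun hc => h ⟨hc, hc.trans hba⟩
        rw [← hba]
        simp [altL, hcb]
      · by_cases hcb : c = b
        · have hca : ¬ c = a := fun hc => h ⟨hcb, hc⟩
          rw [← hcb]
          simp [altL, hca]
        · simp [altL, hcb, hba]
  | c :: d :: l'' =>
    by_cases h : c = b ∧ c = a
    · obtain ⟨h1, h2⟩ := h
      rw [← h1, ← h2]
      by_cases hdc : d = c
      · rw [hdc]
        rw [show cntA c c (c :: c :: l'') = 1 + cntA c c l'' from by simp [cntA]]
        rw [cnt_eq_altL l'' c c]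
        simp [altL]
        omega
      · rw [show cntA c c (c :: d :: l'') = 1 + cntA c d l'' from by simp [cntA]]
        rw [cnt_eq_altL l'' c d]
        simp [altL, hdc]
    · rw [cntA_cons_neg a b c (d :: l'') h]
      rw [cnt_eq_altL (d :: l'') b c]
      by_cases hba : b = a
      · have hcb : ¬ c = b := fun hc => h ⟨hc, hc.trans hba⟩
        rw [← hba]
        simp [altL, hcb]
      · simp [altL, hba]
termination_by l.length

theorem loopA_eq (cs : List Char) (t : List Char) (j : Nat) (a b : Char) (res : Int)
    (h : cs.drop j = a :: b :: t) : loopA cs (j + 2) res = res + cntA a b t := by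
  have hlen : cs.length = j + 2 + t.length := by
    have hl := congrArg List.length h
    simp at hl
    omega
  have hja : cs.getD j ' ' = a := by
    rw [List.getD_eq_getElem?_getD, show j = j + 0 from rfl, ← List.getElem?_drop, h]; rfl
  have hjb : cs.getD (j + 1) ' ' = b := by
    rw [List.getD_eq_getElem?_getD, ← List.getElem?_drop, h]; rfl
  match t with
  | [] =>
    rw [loopA, dif_neg (by simp at hlen; omega)]
    simp [cntA]
  | c :: t' =>
    have hjc : cs.getD (j + 2) ' ' = c := by
      rw [List.getD_eq_getElem?_getD, ← List.getElem?_drop, h]; rfl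
    rw [loopA, dif_pos (by simp at hlen; omega)]
    rw [show j + 2 - 1 = j + 1 from rfl, show j + 2 - 2 = j from rfl, hja, hjb, hjc]
    by_cases hc : c = b ∧ c = a
    · rw [if_pos hc]
      match t' with
      | [] =>
        rw [loopA, dif_neg (by simp at hlen; omega)]
        rw [show cntA a b [c] = 1 from by simp only [cntA]; rw [if_pos hc]]
      | d :: t'' =>
        have hdrop : cs.drop (j + 2) = c :: d :: t'' := by
          rw [← List.drop_drop, h]; rfl
        have ih := loopA_eq cs t'' (j + 2) c d (res + 1) hdrop
        rw [show j + 2 + 2 = (j + 2) + 2 from rfl, ih]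
        rw [show cntA a b (c :: d :: t'') = 1 + cntA c d t'' from by
          simp only [cntA]; rw [if_pos hc]]
        omega
    · rw [if_neg hc]
      have hdrop : cs.drop (j + 1) = b :: c :: t' := by
        rw [← List.drop_drop, h]; rfl
      have ih := loopA_eq cs t' (j + 1) b c res hdrop
      rw [show j + 2 + 1 = (j + 1) + 2 from rfl, ih, cntA_cons_neg a b c t' hc]
termination_by t.length

-- ===== VERDICT (by name: the statement is the Claim_ definition above) =====
theorem min_insertions_to_avoid_three_consecutive_spec : Claim_equal_min_insertions_to_avoid_three_consecutive := by
  intro s _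
  unfold Spec_min_insertions_to_avoid_three_consecutive min_insertions_to_avoid_three_consecutive
    min_insertions_to_avoid_three_consecutive_alt
  cases hcs : s.toList with
  | nil => simp [loopA, altL]
  | cons a tl =>
    cases tl with
    | nil => simp [loopA, altL]
    | cons b t =>
      have := loopA_eq (a :: b :: t) t 0 a b 0 (by simp)
      simpa [cnt_eq_altL] using this
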